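-- pv_equiv track=rewrite | github.com/VoiceofSiren/StudyingProgramming | Python/Coding Test/Programmers/lv1/p-042.py | solution
-- ===== SOURCE A (Python) =====
-- def solution(n, arr1, arr2):
--     answer = []
--     bm1, bm2 = [], []
--     for d1 in arr1:
--         bm1.append(to_binary(n, d1))
--     for d2 in arr2:
--         bm2.append(to_binary(n, d2))
--
--     map_matrix = []
--     for i in range(len(bm1)):
--         map_matrix.append(overlap(bm1[i], bm2[i]))
--
--     for i in range(len(map_matrix)):
--         temp_string = ''
--         for j in range(len(map_matrix[i])):
--             if map_matrix[i][j] == 1: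
--                 temp_string += '#'
--             else:
--                 temp_string += ' '
--         answer.append(temp_string)
--     return answer
--
-- def to_binary(n, decimal):
--     binary_list = []
--     for _ in range(n):
--         if decimal == 0:
--             binary_list.append(0)
--             continue
--         binary_list.append(decimal%2)
--         decimal //= 2
--
--     return binary_list[::-1]
--
-- def overlap(b_list1, b_list2):
--     overlapped_list = []
--     for i in range(len(b_list1)):
--         if b_list1[i]==0 and b_list2[i]==0:
--             overlapped_list.append(0)
--         else:
--             overlapped_list.append(1)
--     return overlapped_list
-- ===== SOURCE B (Python) =====
-- def solution(n, arr1, arr2):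
--     # One pass over zipped rows; each character is read straight off the
--     # integers with shift/mask instead of building per-row binary lists.
--     return [''.join('#' if (a >> k) & 1 or (b >> k) & 1 else ' '
--                     for k in reversed(range(n)))
--             for a, b in zip(arr1, arr2)]
-- ===== Notes on version B (the rewrite author's own statement) =====
-- stated objective: idiomatic
-- what changed: Replaces A's three-pass pipeline (per-number binary lists built by repeated division, an overlap helper merging them into a 0/1 matrix, then a character-accumulation loop) with a single comprehension over zip(arr1, arr2) that reads each character directly off the integers with shift-and-mask bit tests.
import Mathlib
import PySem

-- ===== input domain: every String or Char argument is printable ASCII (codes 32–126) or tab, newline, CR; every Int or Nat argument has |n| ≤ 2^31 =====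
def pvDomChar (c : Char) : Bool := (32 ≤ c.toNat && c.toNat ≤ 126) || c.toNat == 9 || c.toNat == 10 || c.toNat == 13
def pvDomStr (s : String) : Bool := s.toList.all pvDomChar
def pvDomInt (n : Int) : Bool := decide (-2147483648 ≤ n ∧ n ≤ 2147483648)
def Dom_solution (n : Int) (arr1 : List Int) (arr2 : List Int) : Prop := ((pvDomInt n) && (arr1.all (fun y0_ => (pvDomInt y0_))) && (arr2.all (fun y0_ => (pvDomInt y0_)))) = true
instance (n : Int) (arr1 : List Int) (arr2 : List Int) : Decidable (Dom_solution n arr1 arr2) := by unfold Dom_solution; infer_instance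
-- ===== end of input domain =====

-- B replaces A's three passes (binary lists, overlap matrix, char loop) by one
-- comprehension over zip(arr1, arr2) reading characters via shift-and-mask (objective: idiomatic).

-- ===== PORT A =====
-- to_binary(n, decimal): append decimal%2 while halving (or 0 once decimal hit 0), then binary_list[::-1]
def toBinaryA (n : Int) (decimal : Int) : List Int :=
  let st := (PySem.List.pyRange 0 n 1).foldl
      (fun (s : List Int × Int) _ =>
        if s.2 = 0 then (s.1 ++ [0], s.2)
        else (s.1 ++ [PySem.Int.mod s.2 2], PySem.Int.floordiv s.2 2))
      ([], decimal)
  -- binary_list[::-1]: a full slice with step -1 never raises (PySem.List.slice?_none_none_neg_one)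
  (PySem.List.slice? st.1 none none (-1)).getD []

-- overlap(b_list1, b_list2); b_list2[i] is total via pyGetD: every call A's code reaches
-- under Pre_solution has i < len(b_list2) (both lists come from to_binary with the same n)
def overlapA (b1 b2 : List Int) : List Int :=
  (PySem.List.pyRange 0 (PySem.List.len b1) 1).foldl
    (fun acc i =>
      if PySem.List.pyGetD b1 i 0 = 0 ∧ PySem.List.pyGetD b2 i 0 = 0 then acc ++ [0]
      else acc ++ [1]) []

-- bm2[i] is total via pyGetD: under Pre_solution (len arr1 ≤ len arr2) it is in range;
-- inputs where Python raises IndexError there are exactly the ones Pre_solution excludes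
def solution (n : Int) (arr1 : List Int) (arr2 : List Int) : List String :=
  let bm1 := arr1.foldl (fun acc d1 => acc ++ [toBinaryA n d1]) []
  let bm2 := arr2.foldl (fun acc d2 => acc ++ [toBinaryA n d2]) []
  let mm := (PySem.List.pyRange 0 (PySem.List.len bm1) 1).foldl
      (fun acc i => acc ++ [overlapA (PySem.List.pyGetD bm1 i []) (PySem.List.pyGetD bm2 i [])]) []
  mm.foldl (fun ans row =>
      ans ++ [String.mk ((PySem.List.pyRange 0 (PySem.List.len row) 1).foldl
        (fun ts j => ts ++ [if PySem.List.pyGetD row j 0 = 1 then '#' else ' ']) [])]) []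

-- ===== PORT B =====
-- k ranges over reversed(range(n)), so 0 ≤ k and k.toNat is exact
def solution_alt (n : Int) (arr1 : List Int) (arr2 : List Int) : List String :=
  (arr1.zip arr2).map (fun ab =>
    String.mk (((PySem.List.pyRange 0 n 1).reverse).map (fun k =>
      if PySem.Int.band (ab.1 >>> k.toNat) 1 ≠ 0 ∨ PySem.Int.band (ab.2 >>> k.toNat) 1 ≠ 0
      then '#' else ' ')))

-- ===== PRECONDITION & SPEC =====
-- Pre_ excludes only the inputs where A raises IndexError (arr2 shorter than arr1)
def Pre_solution (n : Int) (arr1 : List Int) (arr2 : List Int) : Prop :=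
  arr1.length ≤ arr2.length
instance (n : Int) (arr1 : List Int) (arr2 : List Int) : Decidable (Pre_solution n arr1 arr2) := by unfold Pre_solution; infer_instance

def pvWitness_solution : Int × List Int × List Int := (2, (9 : Int) :: [20, 28, 18, 11], [30, 1, 21, 17, 28])

def Spec_solution (n : Int) (arr1 : List Int) (arr2 : List Int) (out : List String) : Prop := out = solution_alt n arr1 arr2
instance (n : Int) (arr1 : List Int) (arr2 : List Int) (out : List String) : Decidable (Spec_solution n arr1 arr2 out) := by unfold Spec_solution; infer_instance

-- ===== CLAIM (what is proved, stated in full; the proofs are below) =====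
def Claim_equal_solution : Prop := ∀ (n : Int) (arr1 : List Int) (arr2 : List Int), Dom_solution n arr1 arr2 → Pre_solution n arr1 arr2 → Spec_solution n arr1 arr2 (solution n arr1 arr2)

-- ===== LEMMAS AND PROOFS =====

-- bit k of x under Python floor-division semantics (divisors are positive powers of 2)
def bitOf (x : Int) (k : Nat) : Int := x / (2:Int)^k % 2

theorem bitOf_succ (d : Int) (k : Nat) : bitOf d (k+1) = bitOf (d / 2) k := by
  unfold bitOf
  rw [Int.ediv_ediv_of_nonneg (by norm_num : (0:Int) ≤ 2), pow_succ']

theorem foldA_eq (l : List Int) : ∀ (bl : List Int) (d : Int),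
    l.foldl
      (fun (s : List Int × Int) _ =>
        if s.2 = 0 then (s.1 ++ [0], s.2)
        else (s.1 ++ [PySem.Int.mod s.2 2], PySem.Int.floordiv s.2 2))
      (bl, d)
    = (bl ++ (List.range l.length).map (fun k => bitOf d k), d / (2:Int)^l.length) := by
  induction l with
  | nil => intro bl d; simp
  | cons x t ih =>
    intro bl d
    have hstep : (if d = 0 then (bl ++ [(0:Int)], d)
        else (bl ++ [PySem.Int.mod d 2], PySem.Int.floordiv d 2))
        = (bl ++ [d % 2], d / 2) := by
      by_cases h : d = 0
      · simp [h]
      · rw [if_neg h, PySem.Int.mod_eq_emod_of_pos (by norm_num),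
            PySem.Int.floordiv_eq_ediv_of_pos (by norm_num)]
    rw [List.foldl_cons]
    simp only [hstep]
    rw [ih]
    refine Prod.ext ?_ ?_
    · show bl ++ [d % 2] ++ (List.range t.length).map (fun k => bitOf (d/2) k)
        = bl ++ (List.range (t.length + 1)).map (fun k => bitOf d k)
      rw [List.range_succ_eq_map]
      simp only [List.map_cons, List.map_map, List.append_assoc]
      congr 1
      have h0 : bitOf d 0 = d % 2 := by unfold bitOf; simp
      rw [← h0]
      simp only [List.singleton_append, Function.comp_def]
      congr 1
      exact List.map_congr_left (fun k _ => (bitOf_succ d k).symm)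
    · show d / 2 / 2^t.length = d / 2^(t.length+1)
      rw [Int.ediv_ediv_of_nonneg (by norm_num : (0:Int) ≤ 2), pow_succ']

theorem len_pyRange01 (n : Int) : (PySem.List.pyRange 0 n 1).length = n.toNat := by
  rw [PySem.List.pyRange_of_pos 0 n (by norm_num)]
  simp only [List.length_map, List.length_range]
  split <;> omega

theorem toBinaryA_eq (n x : Int) :
    toBinaryA n x = ((List.range n.toNat).map (bitOf x)).reverse := by
  unfold toBinaryA
  rw [foldA_eq]
  simp only [PySem.List.slice?_none_none_neg_one, Option.getD_some, List.nil_append]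
  rw [len_pyRange01]

theorem overlapA_eq (l1 l2 : List Int) (h : l1.length = l2.length) :
    overlapA l1 l2 = (l1.zip l2).map (fun p => if p.1 = 0 ∧ p.2 = 0 then (0:Int) else 1) := by
  unfold overlapA
  have hstep : (fun (acc : List Int) i =>
      if PySem.List.pyGetD l1 i 0 = 0 ∧ PySem.List.pyGetD l2 i 0 = 0 then acc ++ [0]
      else acc ++ [1])
      = (fun acc i => acc ++ [if PySem.List.pyGetD l1 i 0 = 0 ∧ PySem.List.pyGetD l2 i 0 = 0 then (0:Int) else 1]) := by
    funext acc i; split <;> rfl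
  rw [hstep, PySem.List.foldl_append_singleton_eq_map, List.nil_append]
  have hlen : PySem.List.len l1 = (l1.length : Int) := by simp [PySem.List.len]
  rw [hlen, PySem.List.pyRange_zero_natCast, List.map_map]
  apply List.ext_getElem
  · simp [h]
  · intro i h1 h2
    simp only [List.getElem_map, Function.comp_apply, List.getElem_range, List.getElem_zip]
    rw [PySem.List.pyGetD_eq_getElem _ _ (by positivity) (by simp at h1 ⊢; omega),
        PySem.List.pyGetD_eq_getElem _ _ (by positivity) (by simp at h1 ⊢; omega)]
    simp

theorem pyRange01_eq (n : Int) :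
    PySem.List.pyRange 0 n 1 = (List.range n.toNat).map (fun k : Nat => (k : Int)) := by
  rw [PySem.List.pyRange_of_pos 0 n (by norm_num)]
  have hX : (if (0:Int) < n then ((n - 0 + 1 - 1)/1).toNat else 0) = n.toNat := by
    split <;> omega
  rw [hX]
  exact List.map_congr_left (fun k _ => by ring)

theorem idx_zip {β : Type} (f : List Int → List Int → β) (l1 l2 : List (List Int))
    (h : l1.length ≤ l2.length) :
    (PySem.List.pyRange 0 (PySem.List.len l1) 1).map
      (fun i => f (PySem.List.pyGetD l1 i []) (PySem.List.pyGetD l2 i []))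
    = (l1.zip l2).map (fun p => f p.1 p.2) := by
  have hlen : PySem.List.len l1 = (l1.length : Int) := by simp [PySem.List.len]
  rw [hlen, PySem.List.pyRange_zero_natCast, List.map_map]
  apply List.ext_getElem
  · simp; omega
  · intro i h1 h2
    simp only [List.getElem_map, Function.comp_apply, List.getElem_range, List.getElem_zip]
    rw [PySem.List.pyGetD_eq_getElem _ _ (by positivity) (by simp at h1 ⊢; omega),
        PySem.List.pyGetD_eq_getElem _ _ (by positivity) (by simp at h1 ⊢; omega)]
    simp

theorem band_shift_eq_bitOf (x : Int) (k : Nat) :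
    PySem.Int.band (x >>> (k : Int)) 1 = bitOf x k := by
  rw [Int.shiftRight_natCast_right, PySem.Int.band_one, PySem.Int.mod_eq_emod_of_pos (by norm_num),
      Int.shiftRight_eq_div_pow]
  unfold bitOf
  norm_num

theorem row_eq (n a b : Int) :
    (overlapA (toBinaryA n a) (toBinaryA n b)).map (fun v => if v = 1 then '#' else ' ')
    = ((PySem.List.pyRange 0 n 1).reverse).map (fun k =>
        if PySem.Int.band (a >>> k.toNat) 1 ≠ 0 ∨ PySem.Int.band (b >>> k.toNat) 1 ≠ 0
        then '#' else ' ') := by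
  rw [toBinaryA_eq, toBinaryA_eq,
      overlapA_eq _ _ (by simp),
      ← List.map_reverse, ← List.map_reverse, List.zip_map',
      pyRange01_eq, ← List.map_reverse, List.map_map, List.map_map, List.map_map]
  apply List.map_congr_left
  intro k _
  simp only [Function.comp_apply, Int.toNat_natCast, band_shift_eq_bitOf]
  by_cases ha : bitOf a k = 0 <;> by_cases hb : bitOf b k = 0 <;> simp [ha, hb]

-- ===== VERDICT (by name: the statement is the Claim_ definition above) =====
theorem solution_spec : Claim_equal_solution := by
  intro n arr1 arr2 _hD hP
  unfold Spec_solution solution solution_alt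
  simp only [PySem.List.foldl_append_singleton_eq_map, List.nil_append]
  have hzip := idx_zip overlapA
      (List.map (toBinaryA n) arr1) (List.map (toBinaryA n) arr2)
      (by simpa using hP)
  rw [hzip]
  rw [List.zip_map]
  rw [List.map_map, List.map_map]
  apply List.map_congr_left
  intro p _
  simp only [Function.comp_apply, Prod.map]
  apply congrArg String.mk
  have hget : (fun j => if PySem.List.pyGetD (overlapA (toBinaryA n p.1) (toBinaryA n p.2)) j 0 = 1 then '#' else ' ')
      = (fun v => if v = 1 then '#' else ' ') ∘ (fun j => PySem.List.pyGetD (overlapA (toBinaryA n p.1) (toBinaryA n p.2)) j 0) := rfl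
  rw [hget, ← List.map_map, PySem.List.map_pyGetD_pyRange_zero, row_eq]
  exact List.map_congr_left (fun k _ => by rw [Int.shiftRight_natCast_right, Int.shiftRight_natCast_right])
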